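-- pv_equiv track=rewrite | github.com/jejuminji/ming-ai-study | ai-python-study/04_llm_prompt_helpers.py | trim_contexts_by_char_budget
-- ===== SOURCE A (Python) =====
-- from typing import Dict, List, Optional, Sequence
--
-- def trim_contexts_by_char_budget(contexts: Sequence[str], max_chars: int) -> List[str]:
--     # 선택된 문맥을 담을 빈 리스트를 만든다.
--     selected_contexts = []
--
--     # 현재까지 사용한 문자 수를 0으로 시작한다.
--     used_chars = 0
--
--     # 문맥을 앞에서부터 순회하면서 예산 안에 들어오면 추가한다.
--     for context in contexts:
--         # 현재 문맥 길이를 계산한다.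
--         context_length = len(context)
--
--         # 현재 문맥을 넣으면 예산을 넘는지 확인한다.
--         if used_chars + context_length > max_chars:
--             # break 로 반복을 중단해 문자 수 예산을 초과하지 않게 한다.
--             break
--
--         # 예산 안이면 결과 리스트에 넣는다.
--         selected_contexts.append(context)
--
--         # 사용 문자 수를 갱신한다.
--         used_chars += context_length
--
--     # 예산 안에 들어온 문맥만 반환한다.
--     return selected_contexts
-- ===== SOURCE B (Python) =====
-- from bisect import bisect_right
-- from itertools import accumulate
--
-- def trim_contexts_by_char_budget(contexts, max_chars):
--     totals = list(accumulate(len(c) for c in contexts))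
--     count = bisect_right(totals, max_chars)
--     return list(contexts[:count])
-- ===== Notes on version B (the rewrite author's own statement) =====
-- stated objective: alternative
-- what changed: Replaces the append-and-break accumulation loop by building the prefix-sum table of context lengths once and binary-searching it (bisect_right) for the admissible prefix count, then slicing.
import Mathlib
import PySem

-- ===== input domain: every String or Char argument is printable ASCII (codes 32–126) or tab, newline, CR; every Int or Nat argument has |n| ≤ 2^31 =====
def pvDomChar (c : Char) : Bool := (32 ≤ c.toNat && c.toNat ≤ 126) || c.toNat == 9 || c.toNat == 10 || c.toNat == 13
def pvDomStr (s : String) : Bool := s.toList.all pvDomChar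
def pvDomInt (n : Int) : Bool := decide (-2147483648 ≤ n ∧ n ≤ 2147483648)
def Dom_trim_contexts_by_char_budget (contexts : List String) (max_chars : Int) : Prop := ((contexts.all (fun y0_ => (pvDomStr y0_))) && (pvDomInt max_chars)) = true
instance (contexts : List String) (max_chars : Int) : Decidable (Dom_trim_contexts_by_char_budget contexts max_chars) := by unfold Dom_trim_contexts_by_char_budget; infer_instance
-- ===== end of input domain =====

-- B replaces A's append-and-break loop by a prefix-sum table plus binary search (bisect_right); alternative decomposition, same results.

-- ===== PORT A =====
-- the for-loop with break: state = (selected_contexts, used_chars)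
def trimLoopA (max_chars : Int) : List String → List String → Int → List String
  | [], acc, _ => acc
  | c :: cs, acc, used =>
    let context_length : Int := (c.length : Int)
    if used + context_length > max_chars then acc
    else trimLoopA max_chars cs (acc ++ [c]) (used + context_length)

def trim_contexts_by_char_budget (contexts : List String) (max_chars : Int) : List String :=
  trimLoopA max_chars contexts [] 0

-- ===== PORT B =====
-- itertools.accumulate(len(c) for c in contexts)
def prefixTotals : List String → Int → List Int
  | [], _ => []
  | c :: cs, s => (s + (c.length : Int)) :: prefixTotals cs (s + (c.length : Int))

-- bisect.bisect_right(a, x) : binary search over [lo, hi)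
def bisectGo (a : List Int) (x : Int) (lo hi : Nat) : Nat :=
  if _h : lo < hi then
    let mid := (lo + hi) / 2
    if x < a.getD mid 0 then bisectGo a x lo mid
    else bisectGo a x (mid + 1) hi
  else lo
termination_by hi - lo
decreasing_by all_goals omega

def trim_contexts_by_char_budget_alt (contexts : List String) (max_chars : Int) : List String :=
  let totals := prefixTotals contexts 0
  let count := bisectGo totals max_chars 0 totals.length
  contexts.take count

-- ===== PRECONDITION & SPEC =====
def Spec_trim_contexts_by_char_budget (contexts : List String) (max_chars : Int) (out : List String) : Prop := out = trim_contexts_by_char_budget_alt contexts max_chars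
instance (contexts : List String) (max_chars : Int) (out : List String) : Decidable (Spec_trim_contexts_by_char_budget contexts max_chars out) := by unfold Spec_trim_contexts_by_char_budget; infer_instance

-- ===== CLAIM (what is proved, stated in full; the proofs are below) =====
def Claim_equal_trim_contexts_by_char_budget : Prop := ∀ (contexts : List String) (max_chars : Int), Dom_trim_contexts_by_char_budget contexts max_chars → Spec_trim_contexts_by_char_budget contexts max_chars (trim_contexts_by_char_budget contexts max_chars)

-- ===== LEMMAS AND PROOFS =====

-- every entry of prefixTotals cs s is ≥ s (lengths are non-negative)
theorem prefixTotals_mem_le (cs : List String) (s : Int) :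
    ∀ t ∈ prefixTotals cs s, s ≤ t := by
  induction cs generalizing s with
  | nil => intro t ht; simp [prefixTotals] at ht
  | cons c cs ih =>
    intro t ht
    simp only [prefixTotals, List.mem_cons] at ht
    rcases ht with h | h
    · omega
    · have := ih (s + (c.length : Int)) t h
      have : (0:Int) ≤ (c.length : Int) := by positivity
      omega

theorem prefixTotals_sorted (cs : List String) (s : Int) :
    (prefixTotals cs s).Pairwise (· ≤ ·) := by
  induction cs generalizing s with
  | nil => simp [prefixTotals]
  | cons c cs ih =>
    simp only [prefixTotals, List.pairwise_cons]
    exact ⟨prefixTotals_mem_le cs _, ih _⟩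

-- the A-side loop computes acc ++ take (takeWhile-length of the prefix sums) cs
theorem trimLoopA_eq (max_chars : Int) (cs : List String) :
    ∀ acc used, trimLoopA max_chars cs acc used =
      acc ++ cs.take ((prefixTotals cs used).takeWhile (fun t => decide (t ≤ max_chars))).length := by
  induction cs with
  | nil => intro acc used; simp [trimLoopA, prefixTotals]
  | cons c cs ih =>
    intro acc used
    simp only [trimLoopA, prefixTotals, List.takeWhile]
    by_cases h : used + (c.length : Int) > max_chars
    · have hp : (decide (used + (c.length : Int) ≤ max_chars)) = false := by
        simp; omega
      simp [h, hp]
    · have hp : (decide (used + (c.length : Int) ≤ max_chars)) = true := by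
        simp; omega
      simp only [if_neg h, hp]
      rw [ih]
      simp [List.take_succ_cons]


-- takeWhile boundary facts
theorem takeWhile_getElem_pos (p : Int → Bool) (a : List Int) :
    ∀ i (hi : i < a.length), i < (a.takeWhile p).length → p a[i] = true := by
  induction a with
  | nil => intro i hi; simp at hi
  | cons c cs ih =>
    intro i hi hK
    cases hc : p c with
    | false => simp [List.takeWhile, hc] at hK
    | true =>
      cases i with
      | zero => simpa using hc
      | succ j =>
        simp only [List.takeWhile, hc, List.length_cons] at hK
        exact ih j (by simpa using hi) (by omega)

theorem takeWhile_getElem_boundary (p : Int → Bool) (a : List Int)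
    (h : (a.takeWhile p).length < a.length) :
    p a[(a.takeWhile p).length] = false := by
  induction a with
  | nil => simp at h
  | cons c cs ih =>
    cases hc : p c with
    | false => simp [List.takeWhile, hc]
    | true =>
      simp only [List.takeWhile, hc, List.length_cons] at h ⊢
      simpa using ih (by omega)

-- bisect correctness by strong induction on hi - lo
theorem bisectGo_eq (a : List Int) (x : Int) (K : Nat)
    (hle : ∀ i (h : i < a.length), i < K → a[i] ≤ x)
    (hgt : ∀ i (h : i < a.length), K ≤ i → x < a[i]) :
    ∀ n lo hi, hi - lo ≤ n → lo ≤ K → K ≤ hi → hi ≤ a.length →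
      bisectGo a x lo hi = K := by
  intro n
  induction n with
  | zero =>
    intro lo hi h1 h2 h3 h4
    rw [bisectGo]
    have : ¬ lo < hi := by omega
    simp [this]; omega
  | succ n ih =>
    intro lo hi h1 h2 h3 h4
    rw [bisectGo]
    by_cases hlt : lo < hi
    · simp only [hlt, dif_pos]
      have hmidlt : (lo + hi) / 2 < hi := by omega
      have hmidge : lo ≤ (lo + hi) / 2 := by omega
      have hmida : (lo + hi) / 2 < a.length := by omega
      have hd : a.getD ((lo + hi) / 2) 0 = a[(lo + hi) / 2] := List.getD_eq_getElem a 0 hmida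
      by_cases hx : x < a.getD ((lo + hi) / 2) 0
      · simp only [hx]
        have hKmid : K ≤ (lo + hi) / 2 := by
          by_contra hcon
          have := hle ((lo + hi) / 2) hmida (by omega)
          rw [hd] at hx; omega
        exact ih lo ((lo + hi) / 2) (by omega) h2 hKmid (by omega)
      · simp only [hx]
        have hKmid : (lo + hi) / 2 < K := by
          by_contra hcon
          have := hgt ((lo + hi) / 2) hmida (by omega)
          rw [hd] at hx; omega
        exact ih ((lo + hi) / 2 + 1) hi (by omega) (by omega) h3 h4
    · simp [hlt]; omega

-- ===== VERDICT (by name: the statement is the Claim_ definition above) =====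
theorem trim_contexts_by_char_budget_spec : Claim_equal_trim_contexts_by_char_budget := by
  intro contexts max_chars _
  unfold Spec_trim_contexts_by_char_budget
  unfold trim_contexts_by_char_budget trim_contexts_by_char_budget_alt
  set a := prefixTotals contexts 0 with ha
  set p : Int → Bool := fun t => decide (t ≤ max_chars) with hp
  set K := (a.takeWhile p).length with hK
  have hKlen : K ≤ a.length := (List.takeWhile_sublist p).length_le
  have hpair := (List.pairwise_iff_getElem).mp (prefixTotals_sorted contexts 0)
  rw [← ha] at hpair
  have hle : ∀ i (h : i < a.length), i < K → a[i] ≤ max_chars := by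
    intro i hi hiK
    have := takeWhile_getElem_pos p a i hi (hK ▸ hiK)
    simpa [hp] using this
  have hgt : ∀ i (h : i < a.length), K ≤ i → max_chars < a[i] := by
    intro i hi hKi
    have hKa : K < a.length := lt_of_le_of_lt hKi hi
    have hb := takeWhile_getElem_boundary p a (hK ▸ hKa)
    have hbx : max_chars < a[K] := by
      have : ¬ (a[K] ≤ max_chars) := by simpa [hp, hK] using hb
      omega
    rcases Nat.lt_or_ge K i with h | h
    · exact lt_of_lt_of_le hbx (hpair K i hKa hi h)
    · have : K = i := by omega
      subst this; exact hbx
  have hbs := bisectGo_eq a max_chars K hle hgt a.length 0 a.length (by omega) (by omega) hKlen (le_refl _)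
  show trimLoopA max_chars contexts [] 0 = List.take (bisectGo a max_chars 0 a.length) contexts
  rw [hbs]
  exact (trimLoopA_eq max_chars contexts [] 0).trans (by simp [hK, ha, hp])
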